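-- pv_equiv track=rewrite | github.com/VladimirDmitriev1997/ai-hedge-fund | src/hedge/fitting/learning.py | _iter_grid
-- ===== SOURCE A (Python) =====
-- from typing import (
--     Any,
--     Dict,
--     Iterable,
--     List,
--     Mapping,
--     Optional,
--     Sequence,
--     Tuple,
--     Union,
--     Callable,
--     TYPE_CHECKING,
-- )
-- import itertools
--
-- def _iter_grid(param_grid: Mapping[str, Sequence[Any]]) -> Iterable[Dict[str, Any]]:
--     """
--     Cartesian product over parameter grid.
--
--     Parameters
--     ----------
--     param_grid : Mapping[str, Sequence[Any]]
--         Dict of parameter name → sequence of candidate values.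
--
--     Returns
--     -------
--     Iterable[Dict[str, Any]]
--         Generator of param dicts.
--     """
--     if not param_grid:
--         yield {}
--         return
--     keys = list(param_grid.keys())
--     vals = [list(v) for v in param_grid.values()]
--     for combo in itertools.product(*vals):
--         yield dict(zip(keys, combo))
-- ===== SOURCE B (Python) =====
-- def _iter_grid(param_grid):
--     """Cartesian product over parameter grid, built by an incremental fold
--     over the keys: a growing list of partial parameter assignments."""
--     result = [{}]
--     for key in param_grid:
--         values = list(param_grid[key])
--         result = [{**partial, key: v} for partial in result for v in values]
--     for d in result:
--         yield d
-- ===== Notes on version B (the rewrite author's own statement) =====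
-- stated objective: alternative
-- what changed: Replaces the itertools.product call over pre-materialised value lists with an incremental fold over the keys that maintains a growing list of partial parameter dicts, extending each partial with every value of the next key.
import Mathlib
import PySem

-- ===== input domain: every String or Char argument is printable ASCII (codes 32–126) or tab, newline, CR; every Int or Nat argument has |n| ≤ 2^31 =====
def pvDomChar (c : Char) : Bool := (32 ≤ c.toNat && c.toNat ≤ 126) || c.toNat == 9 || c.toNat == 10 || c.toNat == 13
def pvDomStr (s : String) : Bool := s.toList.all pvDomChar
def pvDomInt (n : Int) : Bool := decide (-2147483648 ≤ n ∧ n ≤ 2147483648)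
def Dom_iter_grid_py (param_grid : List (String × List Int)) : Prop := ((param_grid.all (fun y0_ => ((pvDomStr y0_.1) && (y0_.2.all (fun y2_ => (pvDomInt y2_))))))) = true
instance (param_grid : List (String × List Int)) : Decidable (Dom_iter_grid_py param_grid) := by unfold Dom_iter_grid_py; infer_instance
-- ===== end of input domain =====

-- B replaces the single itertools.product call by an incremental fold over the keys
-- that maintains a growing list of partial parameter dicts (alternative decomposition).

-- ===== PORT A =====
-- itertools.product over the materialised value lists (first axis slowest), exact
def pvProduct (vals : List (List Int)) : List (List Int) :=
  match vals with
  | [] => [[]]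
  | vs :: rest => vs.flatMap (fun v => (pvProduct rest).map (fun t => v :: t))

def iter_grid_py (param_grid : List (String × List Int)) : List (List (String × Int)) :=
  if param_grid.isEmpty then [[]]
  else
    let keys := param_grid.map Prod.fst
    let vals := param_grid.map (fun p => p.2)
    -- dict(zip(keys, combo)): association list in key order (dict keys are distinct)
    (pvProduct vals).map (fun combo => keys.zip combo)

-- ===== PORT B =====
def iter_grid_py_alt (param_grid : List (String × List Int)) : List (List (String × Int)) :=
  param_grid.foldl
    (fun result kv => result.flatMap (fun partial_ => kv.2.map (fun v => partial_ ++ [(kv.1, v)])))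
    [[]]

-- ===== PRECONDITION & SPEC =====
def Spec_iter_grid_py (param_grid : List (String × List Int)) (out : List (List (String × Int))) : Prop := out = iter_grid_py_alt param_grid
instance (param_grid : List (String × List Int)) (out : List (List (String × Int))) : Decidable (Spec_iter_grid_py param_grid out) := by unfold Spec_iter_grid_py; infer_instance

-- ===== CLAIM (what is proved, stated in full; the proofs are below) =====
def Claim_equal_iter_grid_py : Prop := ∀ (param_grid : List (String × List Int)), Dom_iter_grid_py param_grid → Spec_iter_grid_py param_grid (iter_grid_py param_grid)

-- ===== LEMMAS AND PROOFS =====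

-- canonical right-recursive form of the grid product, mediating between the two ports
def pvF (g : List (String × List Int)) : List (List (String × Int)) :=
  match g with
  | [] => [[]]
  | (k, vs) :: rest => vs.flatMap (fun v => (pvF rest).map (fun t => (k, v) :: t))

theorem pvB_foldl (g : List (String × List Int)) :
    ∀ (acc : List (List (String × Int))),
      g.foldl (fun result kv => result.flatMap (fun p => kv.2.map (fun v => p ++ [(kv.1, v)]))) acc
        = acc.flatMap (fun p => (pvF g).map (fun t => p ++ t)) := by
  induction g with
  | nil => intro acc; simp [pvF]
  | cons kv rest ih =>
    intro acc
    obtain ⟨k, vs⟩ := kv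
    simp only [List.foldl_cons, ih, pvF]
    simp [List.flatMap_assoc, List.flatMap_map, List.map_map, Function.comp_def,
          List.map_flatMap, List.append_assoc]

theorem pvA_eq_F (g : List (String × List Int)) :
    (pvProduct (g.map (fun p => p.2))).map (fun combo => (g.map Prod.fst).zip combo) = pvF g := by
  induction g with
  | nil => simp [pvProduct, pvF]
  | cons kv rest ih =>
    obtain ⟨k, vs⟩ := kv
    simp only [List.map_cons, pvProduct, pvF, List.map_flatMap, List.map_map]
    refine List.flatMap_congr (fun v _ => ?_)
    rw [← ih]
    simp [List.map_map, Function.comp_def, List.zip]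

theorem pvB_eq_F (g : List (String × List Int)) : iter_grid_py_alt g = pvF g := by
  unfold iter_grid_py_alt
  rw [pvB_foldl]
  simp

theorem pvA_eq_F' (g : List (String × List Int)) : iter_grid_py g = pvF g := by
  cases g with
  | nil => rfl
  | cons kv rest =>
    unfold iter_grid_py
    simp only [List.isEmpty_cons, if_neg Bool.false_ne_true]
    exact pvA_eq_F (kv :: rest)

-- ===== VERDICT (by name: the statement is the Claim_ definition above) =====
theorem iter_grid_py_spec : Claim_equal_iter_grid_py := by
  intro g _
  show iter_grid_py g = iter_grid_py_alt g
  rw [pvA_eq_F', pvB_eq_F]
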